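-- pv_equiv track=rewrite | github.com/wangtianlesimle/open-sql | process_data/dev/data/process_dev_data.py | merge_tokens_base_backtick
-- ===== SOURCE A (Python) =====
-- def merge_tokens_base_backtick(tokens :list):
--     """
--     根据反引号将列名被分为多个token的组合起来
--     :param tokens:
--     :return:
--     """
--     indexes = []
--     for id, tok in enumerate(tokens):
--         if "`" == tok:
--             indexes.append(id)
--     assert len(indexes) % 2 == 0
--     new_sql_tokens = []
--     if len(indexes) != 0:
--         next_start = 0
--         for start in range(0, len(indexes), 2):
--             tok_str = join(tokens[indexes[start]:indexes[start + 1] + 1])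
--             new_sql_tokens.extend(tokens[next_start:indexes[start]])
--             new_sql_tokens.append(tok_str)
--             end_index = indexes[start + 2] if start + 2 < len(indexes) else len(tokens)
--             if indexes[start + 1] + 1 > len(tokens):
--                 break
--             new_sql_tokens.extend(tokens[indexes[start + 1] + 1: end_index])
--             if end_index == len(tokens):
--                 break
--             next_start = indexes[start + 2]
--     else:
--         new_sql_tokens = tokens
--     return new_sql_tokens
--
-- def join(toks):
--     tok_str = ""
--     for tok in toks:
--         if "`" == tok or ")" == tok or "(" == tok or "'" == tok:
--             tok_str += tok
--         else:
--             tok_str += tok + " "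
--     tok_str = tok_str.replace(" '", "'")
--     tok_str = tok_str.replace(" `", "`")
--     return tok_str.strip()
-- ===== SOURCE B (Python) =====
-- def merge_tokens_base_backtick(tokens: list):
--     assert tokens.count("`") % 2 == 0
--     if "`" not in tokens:
--         return tokens
--     out = []
--     group = None
--     for tok in tokens:
--         if tok == "`":
--             if group is None:
--                 group = ["`"]
--             else:
--                 group.append("`")
--                 out.append(join(group))
--                 group = None
--         elif group is None:
--             out.append(tok)
--         else:
--             group.append(tok)
--     return out
--
-- def join(toks):
--     tok_str = ""
--     for tok in toks:
--         if tok in ("`", ")", "(", "'"):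
--             tok_str += tok
--         else:
--             tok_str += tok + " "
--     tok_str = tok_str.replace(" '", "'")
--     tok_str = tok_str.replace(" `", "`")
--     return tok_str.strip()
-- ===== Notes on version B (the rewrite author's own statement) =====
-- stated objective: simpler
-- what changed: Replaced A's two-phase algorithm (collect all backtick indices, then splice paired slices with next_start/end_index bookkeeping and breaks) by a single linear pass keeping an open group buffer between backticks; join() is unchanged.
import Mathlib
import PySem

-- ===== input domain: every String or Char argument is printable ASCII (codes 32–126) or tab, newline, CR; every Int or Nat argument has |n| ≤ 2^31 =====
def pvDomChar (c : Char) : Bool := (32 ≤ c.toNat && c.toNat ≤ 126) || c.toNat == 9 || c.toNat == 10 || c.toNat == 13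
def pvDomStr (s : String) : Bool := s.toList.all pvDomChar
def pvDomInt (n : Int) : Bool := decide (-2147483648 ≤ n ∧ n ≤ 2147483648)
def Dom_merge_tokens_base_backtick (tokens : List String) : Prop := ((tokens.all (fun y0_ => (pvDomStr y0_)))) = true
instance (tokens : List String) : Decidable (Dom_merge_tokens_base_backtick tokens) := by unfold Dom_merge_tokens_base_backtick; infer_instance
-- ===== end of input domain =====

-- B replaces A's two-phase index-collection + paired-slice splicing by a single linear pass
-- with an "inside backticks" group buffer (objective: simpler; same join helper, same values).

-- ===== PORT A =====
-- join(toks): shared helper of both Pythons (Source B's join is the identical function)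
def pyJoin (toks : List String) : String :=
  let tok_str := toks.foldl (fun acc tok =>
    if tok = "`" ∨ tok = ")" ∨ tok = "(" ∨ tok = "'" then acc ++ tok else acc ++ tok ++ " ") ""
  PySem.Str.strip (PySem.Str.replace (PySem.Str.replace tok_str " '" "'") " `" "`")

-- indexes = [id for id, tok in enumerate(tokens) if tok == "`"]  (A's first loop)
def mtbIndexes (tokens : List String) : List Int :=
  (PySem.List.enumerate tokens).foldl
    (fun acc p => if p.2 = "`" then acc ++ [p.1] else acc) []

-- range(a, b, 2) for the Nat bounds A uses (step is the positive literal 2, so this is exact)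
def mtbRange2 (a b : Nat) : List Nat :=
  if a < b then a :: mtbRange2 (a + 2) b else []
  termination_by b - a

-- A's main loop: 'for start in range(0, len(indexes), 2)' with state (next_start, new_sql_tokens)
-- and its two 'break's as early returns
def mtbLoopA (tokens : List String) (I : List Int) : List Nat → Int → List String → List String
  | [], _, acc => acc
  | start :: starts, next_start, acc =>
    let i0 := I.getD start 0
    let i1 := I.getD (start + 1) 0
    let tok_str := pyJoin (PySem.List.slice tokens (some i0) (some (i1 + 1)))
    let acc1 := acc ++ PySem.List.slice tokens (some next_start) (some i0) ++ [tok_str]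
    let endIdx : Int := if start + 2 < I.length then I.getD (start + 2) 0 else (tokens.length : Int)
    if i1 + 1 > (tokens.length : Int) then acc1
    else
      let acc2 := acc1 ++ PySem.List.slice tokens (some (i1 + 1)) (some endIdx)
      if endIdx = (tokens.length : Int) then acc2
      else mtbLoopA tokens I starts (I.getD (start + 2) 0) acc2

-- the assert raises exactly outside Pre_merge_tokens_base_backtick; no value is claimed there
def merge_tokens_base_backtick (tokens : List String) : List String :=
  let I := mtbIndexes tokens
  if I.length ≠ 0 then mtbLoopA tokens I (mtbRange2 0 I.length) 0 []
  else tokens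

-- ===== PORT B =====
-- B's single pass: group = None ↔ outside backticks; inside, tokens accumulate in the group
def mtbLoopB : List String → Option (List String) → List String → List String
  | [], _, out => out
  | tok :: rest, group, out =>
    if tok = "`" then
      match group with
      | none => mtbLoopB rest (some ["`"]) out
      | some g => mtbLoopB rest none (out ++ [pyJoin (g ++ ["`"])])
    else
      match group with
      | none => mtbLoopB rest none (out ++ [tok])
      | some g => mtbLoopB rest (some (g ++ [tok])) out

-- the assert raises exactly outside Pre_merge_tokens_base_backtick; no value is claimed there
def merge_tokens_base_backtick_alt (tokens : List String) : List String :=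
  if tokens.contains "`" = false then tokens
  else mtbLoopB tokens none []

-- ===== PRECONDITION & SPEC =====
-- Pre_ excludes exactly the inputs with an odd number of "`" tokens, on which both Pythons
-- raise AssertionError (A's 'assert len(indexes) % 2 == 0').
def Pre_merge_tokens_base_backtick (tokens : List String) : Prop :=
  tokens.count "`" % 2 = 0
instance (tokens : List String) : Decidable (Pre_merge_tokens_base_backtick tokens) := by
  unfold Pre_merge_tokens_base_backtick; infer_instance

def pvWitness_merge_tokens_base_backtick : List String :=
  ["select", "`", "col", "name", "`", "from", "t"]

def Spec_merge_tokens_base_backtick (tokens : List String) (out : List String) : Prop :=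
  out = merge_tokens_base_backtick_alt tokens
instance (tokens : List String) (out : List String) : Decidable (Spec_merge_tokens_base_backtick tokens out) := by
  unfold Spec_merge_tokens_base_backtick; infer_instance

-- ===== CLAIM (what is proved, stated in full; the proofs are below) =====
def Claim_equal_merge_tokens_base_backtick : Prop :=
  ∀ (tokens : List String), Dom_merge_tokens_base_backtick tokens →
    Pre_merge_tokens_base_backtick tokens →
    Spec_merge_tokens_base_backtick tokens (merge_tokens_base_backtick tokens)

-- ===== LEMMAS AND PROOFS =====

-- positions of "`" in a token list, structurally (proof-side reference for mtbIndexes)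
def posOf : List String → List Nat
  | [] => []
  | t :: r => if t = "`" then 0 :: (posOf r).map (· + 1) else (posOf r).map (· + 1)

theorem posOf_append (l1 l2 : List String) :
    posOf (l1 ++ l2) = posOf l1 ++ (posOf l2).map (· + l1.length) := by
  induction l1 with
  | nil => simp [posOf]
  | cons x l1 ih =>
      simp only [List.cons_append, posOf, ih, List.map_append, List.map_map]
      split_ifs <;> simp

theorem posOf_eq_nil (l : List String) (h : "`" ∉ l) : posOf l = [] := by
  induction l with
  | nil => rfl
  | cons x r ih =>
      simp only [List.mem_cons, not_or] at h
      simp [posOf, Ne.symm h.1, ih h.2]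

theorem length_posOf (l : List String) : (posOf l).length = l.count "`" := by
  induction l with
  | nil => rfl
  | cons x r ih =>
      by_cases hx : x = "`" <;> simp [posOf, hx, ih]

theorem posOf_lt_length (l : List String) : ∀ p ∈ posOf l, p < l.length := by
  induction l with
  | nil => simp [posOf]
  | cons x r ih =>
      intro p hp
      simp only [posOf] at hp
      split_ifs at hp with hx
      · rcases List.mem_cons.1 hp with h0 | hp'
        · simp [h0]
        · obtain ⟨q, hq, rfl⟩ := List.mem_map.1 hp'
          have := ih q hq; simp only [List.length_cons]; omega
      · obtain ⟨q, hq, rfl⟩ := List.mem_map.1 hp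
        have := ih q hq; simp only [List.length_cons]; omega

-- head of posOf: the first backtick, with the exact shape of the splits
theorem posOf_cons_ex (l : List String) (p : Nat) (t : List Nat) (h : posOf l = p :: t) :
    ∃ pre r, l = pre ++ "`" :: r ∧ "`" ∉ pre ∧ pre.length = p ∧
      t = (posOf r).map (· + (p + 1)) := by
  induction l generalizing p t with
  | nil => simp [posOf] at h
  | cons x l ih =>
      by_cases hx : x = "`"
      · subst hx
        rw [posOf, if_pos rfl] at h
        injection h with hp ht
        exact ⟨[], l, by simp, by simp, by simp [← hp], by simp [← hp, ht]⟩
      · simp only [posOf, if_neg hx] at h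
        cases hl : posOf l with
        | nil => rw [hl] at h; simp at h
        | cons p' t' =>
            rw [hl] at h
            simp only [List.map_cons, List.cons.injEq] at h
            obtain ⟨pre, r, rfl, hpre, hlen, ht⟩ := ih p' t' hl
            refine ⟨x :: pre, r, by simp, ?_, by simp [hlen]; omega, ?_⟩
            · simp only [List.mem_cons, not_or]
              exact ⟨fun hc => hx hc.symm, hpre⟩
            rw [← h.2, ht, List.map_map]
            congr 1; funext q; simp; omega

theorem map_shift_cast (J : List Nat) (s : Int) :
    J.map (fun n : Nat => s + ((n + 1 : Nat) : Int)) = J.map (fun n : Nat => (s + 1) + (n : Int)) := by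
  apply List.map_congr_left
  intro a _
  push_cast
  ring

theorem mtbIndexes_aux (l : List String) (s : Int) (acc : List Int) :
    (PySem.List.enumerate l s).foldl
      (fun acc p => if p.2 = "`" then acc ++ [p.1] else acc) acc
    = acc ++ (posOf l).map (fun n : Nat => s + (n : Int)) := by
  induction l generalizing s acc with
  | nil => simp [PySem.List.enumerate, posOf]
  | cons x l ih =>
      rw [PySem.List.enumerate_cons, List.foldl_cons]
      by_cases hx : x = "`"
      · simp only [hx, if_true]
        rw [ih]
        simp only [posOf, if_true, List.map_cons, List.map_map, Function.comp_def,
          Nat.cast_zero, add_zero]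
        rw [map_shift_cast]
        simp
      · simp only [if_neg (by simpa using hx : ¬((s, x).2 = "`"))]
        rw [ih]
        simp only [posOf, if_neg hx, List.map_map, Function.comp_def]
        rw [map_shift_cast]

theorem mtbIndexes_eq (tokens : List String) :
    mtbIndexes tokens = (posOf tokens).map (fun n : Nat => (n : Int)) := by
  have := mtbIndexes_aux tokens 0 []
  simpa [mtbIndexes] using this

-- B-side loop lemmas
theorem mtbLoopB_out (l : List String) (g : Option (List String)) (out : List String) :
    mtbLoopB l g out = out ++ mtbLoopB l g [] := by
  induction l generalizing g out with
  | nil => simp [mtbLoopB]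
  | cons x l ih =>
      by_cases hx : x = "`"
      · cases g <;> simp only [mtbLoopB, hx, if_true]
        · exact ih _ _
        · rw [ih _ (out ++ _), ih _ ([] ++ _)]; simp
      · cases g <;> simp only [mtbLoopB, if_neg hx]
        · rw [ih _ (out ++ _), ih _ ([] ++ _)]; simp
        · exact ih _ _

theorem mtbLoopB_pre (pre x : List String) (out : List String) (h : "`" ∉ pre) :
    mtbLoopB (pre ++ x) none out = mtbLoopB x none (out ++ pre) := by
  induction pre generalizing out with
  | nil => simp
  | cons a pre ih =>
      simp only [List.mem_cons, not_or] at h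
      simp only [List.cons_append, mtbLoopB, if_neg (Ne.symm h.1)]
      rw [ih _ h.2]; simp

theorem mtbLoopB_mid (mid x : List String) (g out : List String) (h : "`" ∉ mid) :
    mtbLoopB (mid ++ x) (some g) out = mtbLoopB x (some (g ++ mid)) out := by
  induction mid generalizing g with
  | nil => simp
  | cons a mid ih =>
      simp only [List.mem_cons, not_or] at h
      simp only [List.cons_append, mtbLoopB, if_neg (Ne.symm h.1)]
      rw [ih _ h.2]; simp

theorem mtbLoopB_nob (l : List String) (out : List String) (h : "`" ∉ l) :
    mtbLoopB l none out = out ++ l := by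
  have := mtbLoopB_pre l [] out h
  simpa [mtbLoopB] using this

theorem mtbRange2_unfold (a b : Nat) (h : a < b) :
    mtbRange2 a b = a :: mtbRange2 (a + 2) b := by
  rw [mtbRange2, if_pos h]

theorem posOf_eq_nil_iff (l : List String) : posOf l = [] ↔ "`" ∉ l := by
  constructor
  · intro h hm
    have hc := length_posOf l
    rw [h] at hc
    exact (List.count_pos_iff.2 hm).ne' (by simpa using hc.symm)
  · exact posOf_eq_nil l

theorem mtbLoopB_open (xs : List String) (out : List String) :
    mtbLoopB ("`" :: xs) none out = mtbLoopB xs (some ["`"]) out := by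
  simp [mtbLoopB]

theorem mtbLoopB_close (xs : List String) (g out : List String) :
    mtbLoopB ("`" :: xs) (some g) out = mtbLoopB xs none (out ++ [pyJoin (g ++ ["`"])]) := by
  simp [mtbLoopB]

-- reading the index list of pfx ++ rest at offset (posOf pfx).length + j
theorem getI (A B : List Nat) (off j : Nat) (h : j < B.length) :
    ((A ++ B.map (· + off)).map (fun n : Nat => (n : Int))).getD (A.length + j) 0
      = ((B.getD j 0 + off : Nat) : Int) := by
  rw [List.getD_eq_getElem?_getD, List.getD_eq_getElem?_getD, List.map_append,
      List.getElem?_append_right (by simp)]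
  simp [List.getElem?_map, List.getElem?_eq_getElem h]

-- one middle slice of u ++ v ++ w
theorem slice_seg {α : Type} (u v w : List α) (a b : Nat) (ha : a = u.length)
    (hb : b = a + v.length) :
    PySem.List.slice (u ++ v ++ w) (some (a : Int)) (some (b : Int)) = v := by
  subst ha; subst hb
  rw [PySem.List.slice_natCast, List.append_assoc, List.drop_left]
  simp

-- MAIN LEMMA: A's loop, started at the pair-index boundary of pfx/rest, produces B's scan of rest
theorem mtbLoopA_eq (n : Nat) : ∀ (rest : List String), rest.length ≤ n →
    (posOf rest).length % 2 = 0 → posOf rest ≠ [] →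
    ∀ (pfx : List String) (acc : List String),
      mtbLoopA (pfx ++ rest) (mtbIndexes (pfx ++ rest))
        (mtbRange2 (posOf pfx).length (posOf (pfx ++ rest)).length)
        (pfx.length : Int) acc
      = acc ++ mtbLoopB rest none [] := by
  induction n with
  | zero =>
      intro rest hlen _ hne
      have : rest = [] := by cases rest <;> simp_all
      rw [this] at hne
      exact absurd rfl hne
  | succ n ih =>
      intro rest hlen heven hne pfx acc
      obtain ⟨p, t, hpt⟩ : ∃ p t, posOf rest = p :: t := by
        cases h : posOf rest with
        | nil => exact absurd h hne
        | cons a b => exact ⟨a, b, rfl⟩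
      obtain ⟨pre, r1, hrest, hpre, hplen, ht⟩ := posOf_cons_ex rest p t hpt
      have htne : t ≠ [] := by
        intro h
        rw [hpt, h] at heven
        simp at heven
      obtain ⟨q, t1, hq⟩ : ∃ q t1, posOf r1 = q :: t1 := by
        cases h : posOf r1 with
        | nil => rw [h] at ht; simp at ht; exact absurd ht htne
        | cons a b => exact ⟨a, b, rfl⟩
      obtain ⟨mid, r2, hr1, hmid, hqlen, ht1⟩ := posOf_cons_ex r1 q t1 hq
      -- the exact shape of posOf rest
      have hB : posOf rest = p :: (p + 1 + q) :: (posOf r2).map (· + (p + q + 2)) := by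
        rw [hpt, ht, hq, ht1]
        simp only [List.map_cons, List.map_map, List.cons.injEq, true_and]
        constructor
        · omega
        · apply List.map_congr_left
          intro a _
          simp only [Function.comp_apply]
          omega
      have hBlen : (posOf rest).length = 2 + (posOf r2).length := by rw [hB]; simp; omega
      have hm : (posOf r2).length % 2 = 0 := by
        rw [hBlen] at heven
        omega
      have hItok : mtbIndexes (pfx ++ rest)
          = ((posOf pfx ++ (posOf rest).map (· + pfx.length)).map (fun n : Nat => (n : Int))) := by
        rw [mtbIndexes_eq, posOf_append]
      have hIlen : (mtbIndexes (pfx ++ rest)).length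
          = (posOf pfx).length + (2 + (posOf r2).length) := by
        rw [hItok]; simp [hBlen]
      have hrlen : rest.length = p + 1 + q + 1 + r2.length := by
        rw [hrest, hr1]; simp; omega
      have hrange : mtbRange2 (posOf pfx).length (posOf (pfx ++ rest)).length
          = (posOf pfx).length :: mtbRange2 ((posOf pfx).length + 2) (posOf (pfx ++ rest)).length := by
        apply mtbRange2_unfold
        rw [posOf_append]
        simp only [List.length_append, List.length_map, hBlen]
        omega
      have hi0 : (mtbIndexes (pfx ++ rest)).getD (posOf pfx).length 0
          = ((p + pfx.length : Nat) : Int) := by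
        rw [hItok]
        have := getI (posOf pfx) (posOf rest) pfx.length 0 (by omega)
        simpa [hB] using this
      have hi1 : (mtbIndexes (pfx ++ rest)).getD ((posOf pfx).length + 1) 0
          = (((p + 1 + q) + pfx.length : Nat) : Int) := by
        rw [hItok]
        have := getI (posOf pfx) (posOf rest) pfx.length 1 (by omega)
        simpa [hB] using this
      rw [hrange]
      simp only [mtbLoopA]
      rw [hi0, hi1]
      have hgt : ¬((↑(p + 1 + q + pfx.length) : Int) + 1 > ↑(pfx ++ rest).length) := by
        simp only [List.length_append, not_lt]
        push_cast
        omega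
      rw [if_neg hgt]
      have hs1 : PySem.List.slice (pfx ++ rest) (some (pfx.length : Int))
          (some ((p + pfx.length : Nat) : Int)) = pre := by
        conv_lhs => rw [hrest, show pfx ++ (pre ++ "`" :: r1) = pfx ++ pre ++ ("`" :: r1) by simp]
        exact slice_seg pfx pre ("`" :: r1) _ _ rfl (by omega)
      have hcast : (((p + 1 + q + pfx.length : Nat) : Int)) + 1
          = ((p + 1 + q + pfx.length + 1 : Nat) : Int) := by push_cast; ring
      have hs2 : PySem.List.slice (pfx ++ rest) (some ((p + pfx.length : Nat) : Int))
          (some ((p + 1 + q + pfx.length + 1 : Nat) : Int)) = "`" :: (mid ++ ["`"]) := by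
        conv_lhs => rw [hrest, hr1, show pfx ++ (pre ++ "`" :: (mid ++ "`" :: r2))
          = (pfx ++ pre) ++ ("`" :: (mid ++ ["`"])) ++ r2 by simp]
        exact slice_seg _ _ _ _ _ (by simp [hplen]; omega) (by simp [hqlen]; omega)
      rw [hcast, hs1, hs2]
      by_cases hm0 : (posOf r2).length = 0
      · -- last pair: the remaining tail r2 holds no backtick
        have hr2nil : posOf r2 = [] := List.eq_nil_of_length_eq_zero hm0
        have hcond : ¬((posOf pfx).length + 2 < (mtbIndexes (pfx ++ rest)).length) := by
          rw [hIlen]; omega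
        rw [if_neg hcond, if_pos rfl]
        have hs3 : PySem.List.slice (pfx ++ rest) (some ((p + 1 + q + pfx.length + 1 : Nat) : Int))
            (some (((pfx ++ rest).length : Nat) : Int)) = r2 := by
          conv_lhs => rw [show pfx ++ rest = (pfx ++ pre ++ "`" :: mid ++ ["`"]) ++ r2 ++ []
            by rw [hrest, hr1]; simp]
          exact slice_seg _ _ _ _ _ (by simp [hplen, hqlen]; omega) (by simp [hplen, hqlen]; omega)
        rw [hs3]
        have hBside : mtbLoopB rest none [] = pre ++ [pyJoin ((["`"] ++ mid) ++ ["`"])] ++ r2 := by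
          rw [hrest, hr1, mtbLoopB_pre pre _ [] hpre, mtbLoopB_open,
              mtbLoopB_mid mid _ _ _ hmid, mtbLoopB_close,
              mtbLoopB_nob r2 _ ((posOf_eq_nil_iff r2).1 hr2nil)]
          simp
        rw [hBside]
        simp
      · -- more pairs follow: recurse on the suffix that starts at the next backtick
        obtain ⟨p2, t2, hp2⟩ : ∃ p2 t2, posOf r2 = p2 :: t2 := by
          cases h : posOf r2 with
          | nil => rw [h] at hm0; simp at hm0
          | cons a b => exact ⟨a, b, rfl⟩
        obtain ⟨pre2, r3, hr2, hpre2, hp2len, ht2⟩ := posOf_cons_ex r2 p2 t2 hp2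
        have hp2lt : p2 < r2.length := posOf_lt_length r2 p2 (by rw [hp2]; simp)
        have hr2len : r2.length = p2 + 1 + r3.length := by rw [hr2]; simp; omega
        have hcond : (posOf pfx).length + 2 < (mtbIndexes (pfx ++ rest)).length := by
          rw [hIlen]; omega
        have hi2 : (mtbIndexes (pfx ++ rest)).getD ((posOf pfx).length + 2) 0
            = ((p2 + (p + q + 2) + pfx.length : Nat) : Int) := by
          rw [hItok]
          have := getI (posOf pfx) (posOf rest) pfx.length 2 (by rw [hBlen]; omega)
          simpa [hB, hp2] using this
        rw [if_pos hcond, hi2]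
        rw [if_neg (show ¬(((p2 + (p + q + 2) + pfx.length : Nat) : Int) = ↑(pfx ++ rest).length) by
          simp only [List.length_append, Nat.cast_inj]; omega)]
        have hs4 : PySem.List.slice (pfx ++ rest) (some ((p + 1 + q + pfx.length + 1 : Nat) : Int))
            (some ((p2 + (p + q + 2) + pfx.length : Nat) : Int)) = pre2 := by
          conv_lhs => rw [show pfx ++ rest = (pfx ++ pre ++ "`" :: mid ++ ["`"]) ++ pre2 ++ ("`" :: r3)
            by rw [hrest, hr1, hr2]; simp]
          exact slice_seg _ _ _ _ _ (by simp [hplen, hqlen]; omega) (by simp [hp2len]; omega)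
        rw [hs4]
        have hlen' : ("`" :: r3).length ≤ n := by
          simp only [List.length_cons]
          omega
        have hev' : (posOf ("`" :: r3)).length % 2 = 0 := by
          have h1 : (posOf ("`" :: r3)).length = (posOf r2).length := by
            rw [hp2, ht2]
            simp [posOf]
          rw [h1]; exact hm
        have hne' : posOf ("`" :: r3) ≠ [] := by simp [posOf]
        have hih := ih ("`" :: r3) hlen' hev' hne' (pfx ++ pre ++ "`" :: mid ++ "`" :: pre2)
          (acc ++ pre ++ [pyJoin ("`" :: (mid ++ ["`"]))] ++ pre2)
        rw [show (pfx ++ pre ++ "`" :: mid ++ "`" :: pre2) ++ "`" :: r3 = pfx ++ rest by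
          rw [hrest, hr1, hr2]; simp] at hih
        rw [show (posOf (pfx ++ pre ++ "`" :: mid ++ "`" :: pre2)).length = (posOf pfx).length + 2 by
          simp only [length_posOf, List.count_append, List.count_cons]
          rw [List.count_eq_zero.2 hpre, List.count_eq_zero.2 hmid, List.count_eq_zero.2 hpre2]
          simp] at hih
        rw [show ((pfx ++ pre ++ "`" :: mid ++ "`" :: pre2).length : Int)
            = ((p2 + (p + q + 2) + pfx.length : Nat) : Int) by
          simp only [List.length_append, List.length_cons]
          congr 1
          omega] at hih
        rw [hih]
        have hBside : mtbLoopB rest none []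
            = (([] ++ pre ++ [pyJoin ((["`"] ++ mid) ++ ["`"])]) ++ pre2)
              ++ mtbLoopB ("`" :: r3) none [] := by
          rw [hrest, hr1, mtbLoopB_pre pre _ [] hpre, mtbLoopB_open,
              mtbLoopB_mid mid _ _ _ hmid, mtbLoopB_close, hr2,
              mtbLoopB_pre pre2 _ _ hpre2, mtbLoopB_out]
        rw [hBside]
        simp

-- ===== VERDICT (by name: the statement is the Claim_ definition above) =====
theorem merge_tokens_base_backtick_spec : Claim_equal_merge_tokens_base_backtick := by
  intro tokens _ hpre
  unfold Spec_merge_tokens_base_backtick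
  simp only [merge_tokens_base_backtick, merge_tokens_base_backtick_alt]
  by_cases hbt : "`" ∈ tokens
  · have hcnt : tokens.count "`" ≠ 0 := by
      simpa using (List.count_pos_iff.2 hbt).ne'
    have hne : posOf tokens ≠ [] := by
      intro h
      have hc := length_posOf tokens
      rw [h] at hc
      exact hcnt hc.symm
    have hIlen : ¬(mtbIndexes tokens).length = 0 := by
      rw [mtbIndexes_eq]
      simpa using hne
    rw [if_pos hIlen, if_neg (show ¬tokens.contains "`" = false by simp [hbt])]
    have heven : (posOf tokens).length % 2 = 0 := by
      rw [length_posOf]; exact hpre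
    have hmain := mtbLoopA_eq tokens.length tokens le_rfl heven hne [] []
    simpa [mtbIndexes_eq, posOf] using hmain
  · have h0 : posOf tokens = [] := posOf_eq_nil tokens hbt
    rw [if_neg (show ¬¬(mtbIndexes tokens).length = 0 by rw [mtbIndexes_eq, h0]; simp),
        if_pos (show tokens.contains "`" = false by simp [hbt])]
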